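-- pv_equiv track=rewrite | github.com/erik-saltwell/rpg-subreddit-processor | src/rpg_subreddit_processor/arctic_shift/arctic_shift_parser.py | clean_post_text
-- ===== SOURCE A (Python) =====
-- def clean_post_text(title: str, body: str) -> str:
--     """Normalize and combine title/body text into a single string."""
--
--     title_text = title or ""
--     body_text = body or ""
--     full_text: str
--     if not body_text.startswith(title_text):
--         full_text = title_text + "\n" + body_text
--     else:
--         full_text = body_text
--
--     strings_to_strip = [
--         "[BitD]",
--         "[BoB]",
--         "[S&V]",
--         "[Band of Blades]",
--         "[FitD]",
--         "[BitD-DC]",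
--         "[Scum & Villainy]",
--         "[FitD / BoB]",
--         "[DC]",
--         "[Fistful of Darkness]",
--         "[BITD]",
--         "[FITD]",
--         "[World of Dungeons]",
--         "[WOD]",
--         "[WoD]",
--         "[Slugblasters]",
--         "[Band of blades]",
--         "[Deathmatch Island]",
--     ]
--     for strip_string in strings_to_strip:
--         full_text = full_text.replace(strip_string, "")
--
--     lines: list[str] = full_text.splitlines()
--     return " ".join([line.strip() for line in lines])
-- ===== SOURCE B (Python) =====
-- _TAGS = [
--     "[BitD]",
--     "[BoB]",
--     "[S&V]",
--     "[Band of Blades]",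
--     "[FitD]",
--     "[BitD-DC]",
--     "[Scum & Villainy]",
--     "[FitD / BoB]",
--     "[DC]",
--     "[Fistful of Darkness]",
--     "[BITD]",
--     "[FITD]",
--     "[World of Dungeons]",
--     "[WOD]",
--     "[WoD]",
--     "[Slugblasters]",
--     "[Band of blades]",
--     "[Deathmatch Island]",
-- ]
--
--
-- def clean_post_text(title: str, body: str) -> str:
--     """Normalize and combine title/body text into a single string."""
--     title = title or ""
--     body = body or ""
--     full = body if body.startswith(title) else title + "\n" + body
--     # strip every tag in ONE left-to-right scan instead of one pass per tag
--     out = []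
--     i = 0
--     n = len(full)
--     while i < n:
--         c = full[i]
--         if c != "[":
--             out.append(c)
--             i += 1
--             continue
--         for tag in _TAGS:
--             if full.startswith(tag, i):
--                 i += len(tag)
--                 break
--         else:
--             out.append(c)
--             i += 1
--     text = "".join(out)
--     return " ".join(line.strip() for line in text.splitlines())
-- ===== Notes on version B (the rewrite author's own statement) =====
-- stated objective: alternative
-- what changed: B removes all 18 tags in a single left-to-right scan of the combined text (at each '[' it tries every tag once and skips the match) instead of A's 18 whole-string replace passes; Pre_ conservatively excludes combined texts containing two '[' with no ']' between them, the only place where A's sequential passes can glue a new tag occurrence out of pieces left by an earlier removal (on many excluded inputs nothing is glued and both agree).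
-- outside the precondition, e.g. on clean_post_text('', '[Bo[BitD]B]'): A returns '', B returns '[BoB]'; on clean_post_text('', 'x [[ y'): A returns 'x [[ y', B returns 'x [[ y'
import Mathlib
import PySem

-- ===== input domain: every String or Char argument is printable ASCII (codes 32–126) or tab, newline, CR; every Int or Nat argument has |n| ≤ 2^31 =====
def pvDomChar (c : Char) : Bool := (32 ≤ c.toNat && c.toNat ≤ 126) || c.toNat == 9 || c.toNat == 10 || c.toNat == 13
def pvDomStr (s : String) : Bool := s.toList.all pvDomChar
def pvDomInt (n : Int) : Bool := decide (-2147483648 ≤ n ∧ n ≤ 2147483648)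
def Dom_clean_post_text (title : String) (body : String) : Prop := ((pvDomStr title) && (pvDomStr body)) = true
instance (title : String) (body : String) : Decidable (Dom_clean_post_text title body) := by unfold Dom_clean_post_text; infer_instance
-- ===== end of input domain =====

-- B strips all 18 tags in ONE left-to-right scan of the combined text (match any tag at each '[')
-- instead of A's 18 whole-string replace passes; equal on Pre_, return value only, no side effects.

-- ===== PORT A =====
def clean_post_text (title : String) (body : String) : String :=
  -- `title or ""` / `body or ""` on str arguments: the only falsy str is "", so they are the inputs themselves
  let title_text := title
  let body_text := body
  let full_text :=
    if ¬ (PySem.Str.startswith body_text title_text = true) then title_text ++ "\n" ++ body_text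
    else body_text
  let strings_to_strip : List String :=
    ["[BitD]", "[BoB]", "[S&V]", "[Band of Blades]", "[FitD]", "[BitD-DC]",
     "[Scum & Villainy]", "[FitD / BoB]", "[DC]", "[Fistful of Darkness]",
     "[BITD]", "[FITD]", "[World of Dungeons]", "[WOD]", "[WoD]",
     "[Slugblasters]", "[Band of blades]", "[Deathmatch Island]"]
  let full_text := strings_to_strip.foldl
    (fun full_text strip_string => PySem.Str.replace full_text strip_string "") full_text
  let lines := PySem.Str.splitlines full_text
  PySem.Str.join " " (lines.map (fun line => PySem.Str.strip line))

-- ===== PORT B =====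
def pvTags : List String :=
  ["[BitD]", "[BoB]", "[S&V]", "[Band of Blades]", "[FitD]", "[BitD-DC]",
   "[Scum & Villainy]", "[FitD / BoB]", "[DC]", "[Fistful of Darkness]",
   "[BITD]", "[FITD]", "[World of Dungeons]", "[WOD]", "[WoD]",
   "[Slugblasters]", "[Band of blades]", "[Deathmatch Island]"]

def pvTagsL : List (List Char) := pvTags.map String.toList

-- termination fact for the scanner: every tag is nonempty
set_option maxRecDepth 16384 in
lemma pvTagsL_len : ∀ u ∈ pvTagsL, 1 ≤ u.length := by decide

-- Source B's while-loop: at each position, emit the char unless it is '[' and some tag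
-- (first match in list order, `full.startswith(tag, i)`) starts here, in which case skip it.
def pvScan : List Char → List Char
  | [] => []
  | c :: t =>
    if c ≠ '[' then c :: pvScan t
    else
      match h : pvTagsL.find? (fun u => u.isPrefixOf (c :: t)) with
      | some u => pvScan (List.drop u.length (c :: t))
      | none => c :: pvScan t
  termination_by l => l.length
  decreasing_by
  · simp
  · have h1 := pvTagsL_len u (List.mem_of_find?_eq_some h)
    simp [List.length_drop]; omega
  · simp

def clean_post_text_alt (title : String) (body : String) : String :=
  let title := title
  let body := body
  let full := if PySem.Str.startswith body title then body else title ++ "\n" ++ body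
  let text := String.mk (pvScan full.toList)
  PySem.Str.join " " ((PySem.Str.splitlines text).map (fun line => PySem.Str.strip line))

-- ===== PRECONDITION & SPEC =====
def pvBrk (c : Char) : Bool := c == '[' || c == ']'
def pvCombined (title : String) (body : String) : List Char :=
  (if PySem.Str.startswith body title then body else title ++ "\n" ++ body).toList

-- Pre_ excludes inputs whose combined text contains two '[' with no ']' between them (its
-- bracket subsequence contains "[["): only there can A's sequential whole-text replaces glue a
-- new tag occurrence out of pieces left by an earlier removal, a corner where the result of
-- "remove 18 tags one pass each" vs "remove tags in one scan" is an accident of pass order;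
-- the exclusion is conservative (on many excluded inputs no tag is ever glued and both agree).
def Pre_clean_post_text (title : String) (body : String) : Prop :=
  ¬ (['[', '['] <:+: (pvCombined title body).filter pvBrk)

instance (title : String) (body : String) : Decidable (Pre_clean_post_text title body) := by
  unfold Pre_clean_post_text; infer_instance

def pvWitness_clean_post_text : String × String := ("Hello", "Hello world\nsecond [BitD] line")

def Spec_clean_post_text (title : String) (body : String) (out : String) : Prop :=
  out = clean_post_text_alt title body
instance (title : String) (body : String) (out : String) : Decidable (Spec_clean_post_text title body out) := by
  unfold Spec_clean_post_text; infer_instance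

-- ===== CLAIM (what is proved, stated in full; the proofs are below) =====
def Claim_equal_clean_post_text : Prop := ∀ (title : String) (body : String), Dom_clean_post_text title body → Pre_clean_post_text title body → Spec_clean_post_text title body (clean_post_text title body)

-- ===== LEMMAS AND PROOFS =====

-- `pvRem old l` : what Python's `l.replace(old, "")` computes (greedy left-to-right removal).
def pvRem (old : List Char) : List Char → List Char
  | [] => []
  | c :: t =>
    if h : old ≠ [] ∧ old.isPrefixOf (c :: t) = true then
      pvRem old (List.drop old.length (c :: t))
    else c :: pvRem old t
  termination_by l => l.length
  decreasing_by
  · have : 1 ≤ old.length := List.length_pos_iff.mpr h.1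
    simp [List.length_drop]; omega
  · simp

lemma pvRem_go (old : List Char) (hne : old ≠ []) :
    ∀ fuel l acc, l.length ≤ fuel →
      PySem.Chars.replace.go old [] fuel l acc = acc.reverse ++ pvRem old l := by
  intro fuel
  induction fuel with
  | zero =>
    intro l acc h
    have hl : l = [] := by cases l with | nil => rfl | cons a b => simp at h
    subst hl
    rw [PySem.Chars.replace.go.eq_def]
    simp [pvRem]
  | succ n ih =>
    intro l acc h
    cases l with
    | nil => rw [PySem.Chars.replace.go.eq_def]; simp [pvRem]
    | cons c t =>
      rw [PySem.Chars.replace.go.eq_def]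
      simp only []
      rw [pvRem]
      by_cases hp : old.isPrefixOf (c :: t) = true
      · rw [if_pos hp, dif_pos ⟨hne, hp⟩, ih]
        · simp
        · have h1 : 1 ≤ old.length := List.length_pos_iff.mpr hne
          simp only [List.length_drop, List.length_cons] at *
          omega
      · rw [if_neg hp, dif_neg (by tauto), ih t (c :: acc) (by simp at h ⊢; omega)]
        simp

lemma pvReplace_eq (old l : List Char) (hne : old ≠ []) :
    PySem.Chars.replace l old [] = pvRem old l := by
  rw [PySem.Chars.replace]
  rw [if_neg (by simpa using hne)]
  simpa using pvRem_go old hne l.length l [] le_rfl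

-- char-level version of A's fold of 18 replaces
def pvStripAll (tags : List (List Char)) (l : List Char) : List Char :=
  tags.foldl (fun l t => PySem.Chars.replace l t []) l

def pvR (tags : List (List Char)) (l : List Char) : List Char :=
  tags.foldl (fun l t => pvRem t l) l

lemma pvStripAll_eq_pvR (tags : List (List Char)) (h : ∀ t ∈ tags, t ≠ []) :
    ∀ l, pvStripAll tags l = pvR tags l := by
  induction tags with
  | nil => intro l; rfl
  | cons t ts ih =>
    intro l
    show pvStripAll ts (PySem.Chars.replace l t []) = pvR ts (pvRem t l)
    rw [pvReplace_eq t l (h t (List.mem_cons_self ..))]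
    exact ih (fun u hu => h u (List.mem_cons_of_mem _ hu)) _

lemma pvFold_toList (ts : List String) (s : String) :
    (ts.foldl (fun acc t => PySem.Str.replace acc t "") s).toList
      = pvStripAll (ts.map String.toList) s.toList := by
  induction ts generalizing s with
  | nil => rfl
  | cons t ts ih =>
    show (ts.foldl (fun acc t => PySem.Str.replace acc t "") (PySem.Str.replace s t "")).toList = _
    rw [ih]
    show _ = pvStripAll (ts.map String.toList) (PySem.Chars.replace s.toList t.toList [])
    rw [PySem.Str.toList_replace]
    rfl

-- the tag shape: '[' then a bracket-free interior then ']'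
def pvTagShape (u : List Char) : Prop :=
  ∃ mid, u = '[' :: (mid ++ [']']) ∧ ∀ c ∈ mid, pvBrk c = false

def pvShapeB (u : List Char) : Bool :=
  (u.head? == some '[') && (u.getLast? == some ']') &&
    ((u.drop 1).dropLast.all (fun c => !pvBrk c)) && (2 ≤ u.length)

lemma pvShape_elim (u : List Char) (h : pvShapeB u = true) : pvTagShape u := by
  simp only [pvShapeB, Bool.and_eq_true, beq_iff_eq, List.all_eq_true, decide_eq_true_eq] at h
  obtain ⟨⟨⟨h1, h2⟩, h3⟩, h4⟩ := h
  cases u with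
  | nil => simp at h1
  | cons c t =>
    have hc : c = '[' := by simpa using h1
    have ht : t ≠ [] := by
      intro h0
      subst h0
      simp at h4
    have hlast : t.getLast ht = ']' := by
      have : (c :: t).getLast? = t.getLast? := by
        cases t with
        | nil => exact absurd rfl ht
        | cons d u => exact List.getLast?_cons_cons ..
      rw [this] at h2
      have h5 : t.getLast? = some (t.getLast ht) := List.getLast?_eq_getLast ht
      rw [h5] at h2
      simpa using h2
    refine ⟨t.dropLast, ?_, ?_⟩
    · rw [hc]
      have := List.dropLast_append_getLast ht
      rw [hlast] at this
      rw [this]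
    · intro d hd
      have := h3 d (by simpa using hd)
      simpa using this

set_option maxRecDepth 100000 in
lemma pvTags_shapeB : ∀ u ∈ pvTagsL, pvShapeB u = true := by decide

lemma pvTags_shape : ∀ u ∈ pvTagsL, pvTagShape u :=
  fun u hu => pvShape_elim u (pvTags_shapeB u hu)

set_option maxRecDepth 100000 in
lemma pvTags_incomp : ∀ u ∈ pvTagsL, ∀ v ∈ pvTagsL, u ≠ v → v.isPrefixOf u = false := by decide

-- the bracket automaton: `o` = "the last bracket seen was '['"
def pvOKs : Bool → List Char → Bool
  | _, [] => true
  | o, c :: t => if c = '[' then (if o then false else pvOKs true t) else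
      if c = ']' then pvOKs false t else pvOKs o t

lemma pvOKs_false_infix : ∀ (s : List Char) (o : Bool), pvOKs o s = false →
    ['[', '['] <:+: (if o then '[' :: s.filter pvBrk else s.filter pvBrk) := by
  intro s
  induction s with
  | nil => intro o h; simp [pvOKs] at h
  | cons c t ih =>
    intro o h
    by_cases hc1 : c = '['
    · subst hc1
      cases o with
      | true => exact ⟨[], t.filter pvBrk, by simp [pvBrk]⟩
      | false =>
        have h' : pvOKs true t = false := by simpa [pvOKs] using h
        have := ih true h'
        simpa [pvBrk] using this
    · by_cases hc2 : c = ']'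
      · subst hc2
        have h' : pvOKs false t = false := by simpa [pvOKs] using h
        obtain ⟨p, q, hpq⟩ := by simpa using ih false h'
        cases o with
        | true => exact ⟨'[' :: ']' :: p, q, by simp [pvBrk, ← hpq]⟩
        | false => exact ⟨']' :: p, q, by simp [pvBrk, ← hpq]⟩
      · have h' : pvOKs o t = false := by simpa [pvOKs, hc1, hc2] using h
        have hbrk : pvBrk c = false := by simp [pvBrk, hc1, hc2]
        simpa [hbrk] using ih o h'

lemma pvOK_of_noinfix (s : List Char) (h : ¬ (['[', '['] <:+: s.filter pvBrk)) :
    pvOKs false s = true := by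
  by_contra h0
  exact h (by simpa using pvOKs_false_infix s false (by simpa using h0))

lemma pvOKs_mono : ∀ t, pvOKs true t = true → pvOKs false t = true := by
  intro t
  induction t with
  | nil => intro _; rfl
  | cons c t ih =>
    intro h
    by_cases hc1 : c = '['
    · subst hc1; simp [pvOKs] at h
    · by_cases hc2 : c = ']'
      · subst hc2; simpa [pvOKs] using h
      · simp only [pvOKs, hc1, hc2, if_false] at h ⊢
        exact ih h

lemma pvOKs_tail (c : Char) (t : List Char) (h : pvOKs false (c :: t) = true) :
    pvOKs false t = true := by
  by_cases hc1 : c = '['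
  · subst hc1
    exact pvOKs_mono t (by simpa [pvOKs] using h)
  · by_cases hc2 : c = ']'
    · subst hc2; simpa [pvOKs] using h
    · simpa [pvOKs, hc1, hc2] using h

-- walking the automaton through a bracket-free stretch with the open flag set
lemma pvOKs_open_mid : ∀ (mid : List Char), (∀ c ∈ mid, pvBrk c = false) → ∀ rest,
    pvOKs true (mid ++ ']' :: rest) = pvOKs false rest := by
  intro mid
  induction mid with
  | nil => intro _ rest; simp [pvOKs]
  | cons c m ih =>
    intro h rest
    have hc := h c (List.mem_cons_self ..)
    have hc1 : c ≠ '[' := by intro h0; simp [pvBrk, h0] at hc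
    have hc2 : c ≠ ']' := by intro h0; simp [pvBrk, h0] at hc
    simp only [List.cons_append, pvOKs, hc1, hc2, if_false]
    exact ih (fun d hd => h d (List.mem_cons_of_mem _ hd)) rest

lemma pvOKs_tag (mid : List Char) (h : ∀ c ∈ mid, pvBrk c = false) (rest : List Char) :
    pvOKs false ('[' :: (mid ++ ']' :: rest)) = pvOKs false rest := by
  simp only [pvOKs, if_true]
  exact pvOKs_open_mid mid h rest

-- pvRem preserves the automaton (in either state)
lemma pvRem_ok (v mid : List Char) (hv : v = '[' :: (mid ++ [']']))
    (hmid : ∀ c ∈ mid, pvBrk c = false) :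
    ∀ t o, pvOKs o t = true → pvOKs o (pvRem v t) = true := by
  intro t
  induction t using pvRem.induct v with
  | case1 => intro o h; simpa [pvRem] using h
  | case2 c t h ih =>
    intro o ho
    obtain ⟨r, hr⟩ := List.isPrefixOf_iff_prefix.mp h.2
    have hc : c = '[' := by
      have := congrArg List.head? hr
      simp [hv] at this
      exact this.symm
    cases o with
    | true => subst hc; simp [pvOKs] at ho
    | false =>
      rw [pvRem, dif_pos h]
      have hd : List.drop v.length (c :: t) = r := by rw [← hr, List.drop_left]
      apply ih
      rw [hd]
      have : pvOKs false (v ++ r) = true := by rw [hr]; exact ho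
      rw [hv] at this
      rw [show ('[' :: (mid ++ [']'])) ++ r = '[' :: (mid ++ ']' :: r) by simp] at this
      rwa [pvOKs_tag mid hmid r] at this
  | case3 c t h ih =>
    intro o ho
    rw [pvRem, dif_neg h]
    by_cases hc1 : c = '['
    · subst hc1
      cases o with
      | true => simp [pvOKs] at ho
      | false =>
        have ho' : pvOKs true t = true := by simpa [pvOKs] using ho
        have := ih true ho'
        simpa [pvOKs] using this
    · by_cases hc2 : c = ']'
      · subst hc2
        have ho' : pvOKs false t = true := by simpa [pvOKs] using ho
        have := ih false ho'
        simpa [pvOKs] using this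
      · have ho' : pvOKs o t = true := by simpa [pvOKs, hc1, hc2] using ho
        have := ih o ho'
        simpa [pvOKs, hc1, hc2] using this

-- pvRem cannot create a tag-remainder prefix (w ++ "]" over bracket-free w) when the flag is open
lemma pvRem_nopfx (v : List Char) (hvh : v.head? = some '[') :
    ∀ t, pvOKs true t = true → ∀ w, (∀ c ∈ w, pvBrk c = false) →
      ¬ ((w ++ [']']).isPrefixOf t = true) → ¬ ((w ++ [']']).isPrefixOf (pvRem v t) = true) := by
  intro t
  induction t using pvRem.induct v with
  | case1 =>
    intro _ w _ _ hP
    rw [pvRem] at hP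
    simp [List.isPrefixOf_iff_prefix] at hP
  | case2 c t h ih =>
    intro ho w hw hnp hP
    obtain ⟨r, hr⟩ := List.isPrefixOf_iff_prefix.mp h.2
    have hc : c = '[' := by
      have := congrArg List.head? hr
      cases hv : v with
      | nil => rw [hv] at hvh; simp at hvh
      | cons a b =>
        rw [hv] at hvh this
        simp at hvh this
        rw [← this]
        exact hvh
    subst hc
    simp [pvOKs] at ho
  | case3 c t h ih =>
    intro ho w hw hnp hP
    rw [pvRem, dif_neg h] at hP
    cases w with
    | nil =>
      have hc : c = ']' := by
        have := (List.cons_prefix_cons.mp (List.isPrefixOf_iff_prefix.mp hP)).1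
        exact this.symm
      apply hnp
      apply List.isPrefixOf_iff_prefix.mpr
      rw [hc]
      simpa using List.cons_prefix_cons.mpr ⟨rfl, List.nil_prefix⟩
    | cons d w' =>
      simp only [List.cons_append] at hP
      have hP' := List.cons_prefix_cons.mp (List.isPrefixOf_iff_prefix.mp hP)
      have hcd : d = c := hP'.1
      have hd := hw d (List.mem_cons_self ..)
      have hd1 : c ≠ '[' := by intro h0; rw [hcd, h0] at hd; simp [pvBrk] at hd
      have hd2 : c ≠ ']' := by intro h0; rw [hcd, h0] at hd; simp [pvBrk] at hd
      have ho' : pvOKs true t = true := by simpa [pvOKs, hd1, hd2] using ho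
      have hnp' : ¬ ((w' ++ [']']).isPrefixOf t = true) := by
        intro h0
        apply hnp
        apply List.isPrefixOf_iff_prefix.mpr
        show (d :: w' ++ [']']) <+: (c :: t)
        rw [List.cons_append, hcd]
        exact List.cons_prefix_cons.mpr ⟨rfl, List.isPrefixOf_iff_prefix.mp h0⟩
      exact ih ho' w' (fun e he => hw e (List.mem_cons_of_mem _ he)) hnp'
        (List.isPrefixOf_iff_prefix.mpr hP'.2)

-- a tag (they all start '[') never matches at a non-'[' head
lemma pvNoMatchHead (v : List Char) (hvh : v.head? = some '[') (c : Char) (hc : c ≠ '[')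
    (t : List Char) : ¬ (v ≠ [] ∧ v.isPrefixOf (c :: t) = true) := by
  rintro ⟨h1, h2⟩
  cases v with
  | nil => exact h1 rfl
  | cons a b =>
    have ha : a = '[' := by simpa using hvh
    have := (List.cons_prefix_cons.mp (List.isPrefixOf_iff_prefix.mp h2)).1
    exact hc (by rw [← this, ha])

-- the whole fold walks through a non-'[' head unconditionally
lemma pvR_cons_not (ts : List (List Char)) (hts : ∀ v ∈ ts, pvTagShape v)
    (c : Char) (hc : c ≠ '[') : ∀ t, pvR ts (c :: t) = c :: pvR ts t := by
  induction ts with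
  | nil => intro t; rfl
  | cons v ts' ih =>
    intro t
    obtain ⟨mid, hv, _⟩ := hts v (List.mem_cons_self ..)
    have hvh : v.head? = some '[' := by rw [hv]; rfl
    show pvR ts' (pvRem v (c :: t)) = c :: pvR ts' (pvRem v t)
    rw [pvRem, dif_neg (pvNoMatchHead v hvh c hc t)]
    exact ih (fun u hu => hts u (List.mem_cons_of_mem _ hu)) _

-- and through a '[' head when the automaton is happy and no tag matches there
lemma pvR_cons_lb (ts : List (List Char)) (hts : ∀ v ∈ ts, pvTagShape v) :
    ∀ t, pvOKs true t = true → (∀ v ∈ ts, ¬ (v.isPrefixOf ('[' :: t) = true)) →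
      pvR ts ('[' :: t) = '[' :: pvR ts t := by
  induction ts with
  | nil => intro t _ _; rfl
  | cons v ts' ih =>
    intro t ho hnp
    obtain ⟨mid, hv, hmid⟩ := hts v (List.mem_cons_self ..)
    show pvR ts' (pvRem v ('[' :: t)) = '[' :: pvR ts' (pvRem v t)
    rw [pvRem, dif_neg (by rintro ⟨_, h2⟩; exact hnp v (List.mem_cons_self ..) h2)]
    apply ih (fun u hu => hts u (List.mem_cons_of_mem _ hu))
    · exact pvRem_ok v mid hv hmid t true ho
    · intro u hu hP
      obtain ⟨midu, hu2, hmidu⟩ := hts u (List.mem_cons_of_mem _ hu)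
      
      have hP2 : (midu ++ [']']).isPrefixOf (pvRem v t) = true := by
        rw [hu2] at hP
        exact List.isPrefixOf_iff_prefix.mpr
          (List.cons_prefix_cons.mp (List.isPrefixOf_iff_prefix.mp hP)).2
      have hnpu : ¬ ((midu ++ [']']).isPrefixOf t = true) := by
        intro h0
        apply hnp u (List.mem_cons_of_mem _ hu)
        rw [hu2]
        exact List.isPrefixOf_iff_prefix.mpr
          (List.cons_prefix_cons.mpr ⟨rfl, List.isPrefixOf_iff_prefix.mp h0⟩)
      exact pvRem_nopfx v (by rw [hv]; rfl) t ho midu hmidu hnpu hP2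

-- pvRem passes over a foreign tag at the head without touching it
lemma pvRem_through (v : List Char) (hvh : v.head? = some '[') :
    ∀ (a x : List Char), (∀ c ∈ a, c ≠ '[') → pvRem v (a ++ x) = a ++ pvRem v x := by
  intro a
  induction a with
  | nil => intro x _; simp
  | cons c a' ih =>
    intro x ha
    have hc := ha c (List.mem_cons_self ..)
    show pvRem v (c :: (a' ++ x)) = c :: (a' ++ pvRem v x)
    rw [pvRem, dif_neg (pvNoMatchHead v hvh c hc _)]
    rw [ih x (fun d hd => ha d (List.mem_cons_of_mem _ hd))]

lemma pvRem_foreign (u v : List Char) (hu : pvTagShape u) (hv : pvTagShape v)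
    (hp1 : u.isPrefixOf v = false) (hp2 : v.isPrefixOf u = false) (x : List Char) :
    pvRem v (u ++ x) = u ++ pvRem v x := by
  obtain ⟨mid, hu2, hmid⟩ := hu
  obtain ⟨midv, hv2, _⟩ := hv
  have hvh : v.head? = some '[' := by rw [hv2]; rfl
  have h1 : u ++ x = '[' :: ((mid ++ [']']) ++ x) := by rw [hu2]; simp
  have hnm : ¬ (v ≠ [] ∧ v.isPrefixOf ('[' :: ((mid ++ [']']) ++ x)) = true) := by
    rintro ⟨_, hP⟩
    have hpfx : v <+: u ++ x := by rw [h1]; exact List.isPrefixOf_iff_prefix.mp hP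
    rcases List.prefix_or_prefix_of_prefix hpfx (List.prefix_append u x) with h | h
    · rw [List.isPrefixOf_iff_prefix.mpr h] at hp2; exact Bool.true_eq_false.mp hp2
    · rw [List.isPrefixOf_iff_prefix.mpr h] at hp1; exact Bool.true_eq_false.mp hp1
  have hbf : ∀ c ∈ (mid ++ [']']), c ≠ '[' := by
    intro c hc
    rcases List.mem_append.mp hc with h | h
    · have := hmid c h; intro h0; simp [pvBrk, h0] at this
    · intro h0; simp at h; rw [h] at h0; exact absurd h0 (by decide)
  rw [h1, pvRem, dif_neg hnm, pvRem_through v hvh (mid ++ [']']) x hbf, hu2]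
  simp

lemma pvRem_self (u : List Char) (hu : pvTagShape u) (x : List Char) :
    pvRem u (u ++ x) = pvRem u x := by
  obtain ⟨mid, hu2, _⟩ := hu
  have hpfx : u.isPrefixOf (u ++ x) = true :=
    List.isPrefixOf_iff_prefix.mpr (List.prefix_append u x)
  have hne : u ≠ [] := by rw [hu2]; simp
  have h1 : u ++ x = '[' :: ((mid ++ [']']) ++ x) := by rw [hu2]; simp
  rw [h1, pvRem, dif_pos ⟨hne, by rw [← h1]; exact hpfx⟩, ← h1, List.drop_left]

-- the whole fold erases a tag occurrence at the head
lemma pvR_skip (u : List Char) (hu : pvTagShape u) :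
    ∀ ts, (∀ v ∈ ts, pvTagShape v ∧ (v ≠ u →
        (v.isPrefixOf u = false ∧ u.isPrefixOf v = false))) → u ∈ ts →
      ∀ x, pvR ts (u ++ x) = pvR ts x := by
  intro ts
  induction ts with
  | nil => intro _ h; simp at h
  | cons v ts' ih =>
    intro hts hmem x
    by_cases hvu : v = u
    · subst hvu
      show pvR ts' (pvRem v (v ++ x)) = pvR ts' (pvRem v x)
      rw [pvRem_self v hu x]
    · have hv := hts v (List.mem_cons_self ..)
      show pvR ts' (pvRem v (u ++ x)) = pvR ts' (pvRem v x)
      rw [pvRem_foreign u v hu hv.1 (hv.2 hvu).2 (hv.2 hvu).1 x]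
      exact ih (fun w hw => hts w (List.mem_cons_of_mem _ hw))
        (by rcases List.mem_cons.mp hmem with h | h
            · exact absurd h.symm hvu
            · exact h) _

lemma pvR_nil (ts : List (List Char)) : pvR ts [] = [] := by
  induction ts with
  | nil => rfl
  | cons v ts' ih =>
    show pvR ts' (pvRem v []) = []
    rw [show pvRem v [] = [] by rw [pvRem]]
    exact ih

-- MAIN: on bracket-disciplined text the 18 sequential removals equal the single scan
lemma pvMainScan : ∀ (n : Nat) (s : List Char), s.length ≤ n → pvOKs false s = true →
    pvR pvTagsL s = pvScan s := by
  intro n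
  induction n with
  | zero =>
    intro s hl _
    have : s = [] := by cases s with | nil => rfl | cons a b => simp at hl
    subst this
    rw [pvR_nil, pvScan]
  | succ n ih =>
    intro s hl ho
    cases s with
    | nil => rw [pvR_nil, pvScan]
    | cons c t =>
      by_cases hc : c = '['
      · subst hc
        rw [pvScan]
        rw [if_neg (by simp)]
        split
        · rename_i u hfind
          have hmem := List.mem_of_find?_eq_some hfind
          have hP : u.isPrefixOf ('[' :: t) = true := by
            have := List.find?_some hfind
            simpa using this
          obtain ⟨r, hr⟩ := List.isPrefixOf_iff_prefix.mp hP
          obtain ⟨mid, hu2, hmid⟩ := pvTags_shape u hmem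
          have hdrop : List.drop u.length ('[' :: t) = r := by rw [← hr, List.drop_left]
          rw [hdrop]
          rw [show ('[' :: t) = u ++ r from hr.symm]
          rw [pvR_skip u ⟨mid, hu2, hmid⟩ pvTagsL
            (fun v hv => ⟨pvTags_shape v hv, fun hne =>
              ⟨pvTags_incomp u hmem v hv (Ne.symm hne), pvTags_incomp v hv u hmem hne⟩⟩)
            hmem r]
          have hor : pvOKs false r = true := by
            have h0 : pvOKs false (u ++ r) = true := by rw [hr]; exact ho
            rw [hu2] at h0
            rw [show ('[' :: (mid ++ [']'])) ++ r = '[' :: (mid ++ ']' :: r) by simp] at h0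
            rwa [pvOKs_tag mid hmid r] at h0
          have hlr : r.length ≤ n := by
            have := congrArg List.length hr
            simp [hu2] at this
            simp at hl
            omega
          exact ih r hlr hor
        · rename_i hfind
          have hnp : ∀ v ∈ pvTagsL, ¬ (v.isPrefixOf ('[' :: t) = true) := by
            intro v hv
            simpa using List.find?_eq_none.mp hfind v hv
          rw [pvR_cons_lb pvTagsL pvTags_shape t (by simpa [pvOKs] using ho) hnp]
          congr 1
          exact ih t (by simpa using hl) (pvOKs_tail '[' t ho)
      · rw [pvScan]
        rw [if_pos hc]
        rw [pvR_cons_not pvTagsL pvTags_shape c hc t]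
        congr 1
        exact ih t (by simpa using hl) (pvOKs_tail c t ho)

set_option maxRecDepth 16384 in
lemma pvTagsL_ne : ∀ t ∈ pvTagsL, t ≠ [] := by decide

-- ===== VERDICT (by name: the statement is the Claim_ definition above) =====
theorem clean_post_text_spec : Claim_equal_clean_post_text := by
  intro title body _ hpre
  unfold Spec_clean_post_text
  show clean_post_text title body = clean_post_text_alt title body
  unfold clean_post_text clean_post_text_alt
  simp only []
  rw [show (if ¬ (PySem.Str.startswith body title = true) then title ++ "\n" ++ body else body)
        = (if PySem.Str.startswith body title then body else title ++ "\n" ++ body) from by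
      by_cases h : PySem.Str.startswith body title = true
      · rw [if_neg (not_not_intro h), if_pos h]
      · rw [if_pos h, if_neg h]]
  set full := if PySem.Str.startswith body title then body else title ++ "\n" ++ body with hfull
  have hkey : (pvTags.foldl (fun a t => PySem.Str.replace a t "") full)
      = String.mk (pvScan full.toList) := by
    apply String.toList_inj.mp
    rw [pvFold_toList]
    show pvStripAll pvTagsL full.toList = (String.mk (pvScan full.toList)).toList
    rw [pvStripAll_eq_pvR pvTagsL pvTagsL_ne]
    have hok : pvOKs false full.toList = true := by
      apply pvOK_of_noinfix
      have : pvCombined title body = full.toList := by rw [pvCombined, hfull]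
      rw [← this]
      exact hpre
    rw [pvMainScan full.toList.length full.toList le_rfl hok]
    exact (String.toList_ofList (l := pvScan full.toList)).symm
  rw [show pvTags = ["[BitD]", "[BoB]", "[S&V]", "[Band of Blades]", "[FitD]", "[BitD-DC]",
     "[Scum & Villainy]", "[FitD / BoB]", "[DC]", "[Fistful of Darkness]",
     "[BITD]", "[FITD]", "[World of Dungeons]", "[WOD]", "[WoD]",
     "[Slugblasters]", "[Band of blades]", "[Deathmatch Island]"] from rfl] at hkey
  rw [hkey]
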